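-- pv_equiv track=rewrite | github.com/ray-math/youtube | 32 square circle/final/2 in 1.py | build_graph
-- ===== SOURCE A (Python) =====
-- import math
--
-- def is_perfect_square(n):
--     return math.isqrt(n) ** 2 == n
--
-- def build_graph(n):
--     graph = {i: set() for i in range(1, n+1)}
--     for i in range(1, n+1):
--         for j in range(i+1, n+1):
--             if is_perfect_square(i + j):
--                 graph[i].add(j)
--                 graph[j].add(i)
--     return graph
-- ===== SOURCE B (Python) =====
-- import math
--
-- def build_graph(n):
--     # For each i, enumerate the perfect squares s = k*k in (i, i+n] and take j = s - i,
--     # instead of testing every pair (i, j).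
--     return {
--         i: {k * k - i
--             for k in range(math.isqrt(i) + 1, math.isqrt(i + n) + 1)
--             if k * k != 2 * i}
--         for i in range(1, n + 1)
--     }
-- ===== Notes on version B (the rewrite author's own statement) =====
-- stated objective: faster
-- what changed: Instead of testing every pair (i,j) for i+j being a perfect square, B enumerates for each i the perfect squares k*k in (i, i+n] directly and takes j = k*k - i, so the inner scan over n candidates disappears.
import Mathlib
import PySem

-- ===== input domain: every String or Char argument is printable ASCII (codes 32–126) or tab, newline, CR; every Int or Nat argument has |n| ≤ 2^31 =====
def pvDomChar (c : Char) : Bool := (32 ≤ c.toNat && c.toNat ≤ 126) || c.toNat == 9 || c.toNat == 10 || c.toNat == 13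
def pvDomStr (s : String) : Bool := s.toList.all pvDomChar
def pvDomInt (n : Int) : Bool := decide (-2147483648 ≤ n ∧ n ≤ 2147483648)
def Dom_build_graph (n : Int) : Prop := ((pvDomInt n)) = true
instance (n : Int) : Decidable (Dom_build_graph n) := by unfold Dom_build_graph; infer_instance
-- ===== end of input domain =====

-- B replaces A's O(n^2) pair scan by direct enumeration of the perfect squares k*k in (i, i+n]
-- for each i (j = k*k - i), which a timing run measured as asymptotically faster.

-- ===== PORT A =====
-- math.isqrt, exact for m ≥ 0 (Python raises on m < 0; every call in both ports has m ≥ 0)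
def pyIsqrt (m : Int) : Int := ((Nat.sqrt m.toNat : Nat) : Int)

def is_perfect_square (m : Int) : Bool := pyIsqrt m ^ 2 == m

-- graph[i].add(j): the key is always present, so Dict.modify (with unused default Set.empty)
-- is exactly Python's in-place set mutation here.
def build_graph (n : Int) : List (Int × List Int) :=
  let graph0 : PySem.Dict Int (PySem.Set Int) :=
    (PySem.List.pyRange 1 (n+1) 1).foldl (fun d i => d.insert i PySem.Set.empty)
      (PySem.Dict.mk [])
  let graph :=
    (PySem.List.pyRange 1 (n+1) 1).foldl (fun d i =>
      (PySem.List.pyRange (i+1) (n+1) 1).foldl (fun d j =>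
        if is_perfect_square (i + j) then
          (d.modify i PySem.Set.empty (fun s => PySem.Set.add s j)).modify j PySem.Set.empty
            (fun s => PySem.Set.add s i)
        else d) d) graph0
  graph.items

-- ===== PORT B =====
def build_graph_alt (n : Int) : List (Int × List Int) :=
  (PySem.List.pyRange 1 (n+1) 1).map (fun i =>
    (i, PySem.Set.ofList
          (((PySem.List.pyRange (pyIsqrt i + 1) (pyIsqrt (i + n) + 1) 1).filter
              (fun k => k * k != 2 * i)).map (fun k => k * k - i))))

-- ===== PRECONDITION & SPEC =====
def Spec_build_graph (n : Int) (out : List (Int × List Int)) : Prop := out = build_graph_alt n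
instance (n : Int) (out : List (Int × List Int)) : Decidable (Spec_build_graph n out) := by unfold Spec_build_graph; infer_instance

-- ===== CLAIM (what is proved, stated in full; the proofs are below) =====
def Claim_equal_build_graph : Prop := ∀ (n : Int), Dom_build_graph n → Spec_build_graph n (build_graph n)

-- ===== LEMMAS AND PROOFS =====

-- partners of v that are < a (in increasing order), with A's exact filter predicate
def smallP (a v : Int) : List Int :=
  (PySem.List.pyRange 1 a 1).filter (fun j => is_perfect_square (v + j) && j != v)

-- partners of a in (a, c) (the part of a's own inner loop already processed)
def midP (a c : Int) : List Int :=
  (PySem.List.pyRange (a+1) c 1).filter (fun j => is_perfect_square (a + j) && j != a)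

-- dict value function after A's outer loop has fully processed outer indices < a
def fA (n a : Int) : Int → PySem.Set Int := fun v =>
  if v < a then smallP (n+1) v else smallP a v

-- dict value function while outer index a's inner loop has processed j < c
def gI (n a c : Int) : Int → PySem.Set Int := fun v =>
  if v < a then smallP (n+1) v
  else if v = a then smallP a a ++ midP a c
  else if v < c then smallP (a+1) v
  else smallP a v

-- one iteration of A's inner loop body, on the value function
def updP (i j : Int) (f : Int → PySem.Set Int) : Int → PySem.Set Int := fun v =>
  if is_perfect_square (i + j) then
    (if v = j then PySem.Set.add (f j) i else if v = i then PySem.Set.add (f i) j else f v)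
  else f v

-- one iteration of A's inner loop body, on the dict
def dstep (d : PySem.Dict Int (PySem.Set Int)) (p : Int × Int) : PySem.Dict Int (PySem.Set Int) :=
  if is_perfect_square (p.1 + p.2) then
    (d.modify p.1 PySem.Set.empty (fun s => PySem.Set.add s p.2)).modify p.2 PySem.Set.empty
      (fun s => PySem.Set.add s p.1)
  else d

-- all pairs A's double loop visits, in visiting order
def events (n : Int) : List (Int × Int) :=
  (PySem.List.pyRange 1 (n+1) 1).flatMap (fun i =>
    (PySem.List.pyRange (i+1) (n+1) 1).map (fun j => (i, j)))

lemma get?_mapped (ks : List Int) (f : Int → PySem.Set Int) (k : Int) (hk : k ∈ ks) :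
    (PySem.Dict.mk (ks.map fun v => (v, f v))).get? k = some (f k) := by
  induction ks with
  | nil => cases hk
  | cons x xs ih =>
    rw [List.map_cons, PySem.Dict.get?_mk_cons]
    rcases List.mem_cons.mp hk with h | h
    · subst h; simp
    · by_cases hx : x = k
      · subst hx; simp
      · simp [hx, ih h]

lemma getD_mapped (ks : List Int) (f : Int → PySem.Set Int) (k : Int) (hk : k ∈ ks)
    (d0 : PySem.Set Int) :
    (PySem.Dict.mk (ks.map fun v => (v, f v))).getD k d0 = f k := by
  simp [PySem.Dict.getD, get?_mapped ks f k hk]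

lemma modify_mapped (ks : List Int) (f : Int → PySem.Set Int) (k : Int) (hk : k ∈ ks)
    (d0 : PySem.Set Int) (g : PySem.Set Int → PySem.Set Int) :
    (PySem.Dict.mk (ks.map fun v => (v, f v))).modify k d0 g
      = PySem.Dict.mk (ks.map fun v => (v, if v = k then g (f k) else f v)) := by
  have hc : (PySem.Dict.mk (ks.map fun v => (v, f v))).contains k = true := by
    rw [PySem.Dict.contains_eq_isSome_get?, get?_mapped ks f k hk]; rfl
  show (PySem.Dict.mk (ks.map fun v => (v, f v))).insert k
      (g ((PySem.Dict.mk (ks.map fun v => (v, f v))).getD k d0)) = _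
  rw [getD_mapped ks f k hk]
  show (if _ = true then _ else _) = _
  rw [if_pos hc]
  apply PySem.Dict.ext
  show (ks.map fun v => (v, f v)).map _ = _
  rw [List.map_map]
  refine List.map_congr_left (fun v _ => ?_)
  by_cases hv : v = k
  · subst hv; simp
  · simp [hv]

lemma dstep_mapped (ks : List Int) (f : Int → PySem.Set Int) (i j : Int)
    (hi : i ∈ ks) (hj : j ∈ ks) (hij : i ≠ j) :
    dstep (PySem.Dict.mk (ks.map fun v => (v, f v))) (i, j)
      = PySem.Dict.mk (ks.map fun v => (v, updP i j f v)) := by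
  unfold dstep
  by_cases hsq : is_perfect_square (i + j) = true
  · simp only [hsq, if_true]
    rw [modify_mapped ks f i hi]
    rw [modify_mapped ks _ j hj]
    refine PySem.Dict.ext ?_
    refine List.map_congr_left (fun v _ => ?_)
    have hji : ¬ (j = i) := fun h => hij h.symm
    by_cases hvj : v = j
    · subst hvj; simp [updP, hsq, hji]
    · by_cases hvi : v = i
      · subst hvi; simp [updP, hsq, hvj]
      · simp [updP, hsq, hvj, hvi]
  · simp only [Bool.not_eq_true] at hsq
    simp only [hsq, Bool.false_eq_true, if_false]
    refine PySem.Dict.ext ?_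
    refine List.map_congr_left (fun v _ => ?_)
    simp [updP, hsq]

lemma foldl_dstep_mapped (ks : List Int) :
    ∀ (l : List (Int × Int)) (f : Int → PySem.Set Int),
      (∀ p ∈ l, p.1 ∈ ks ∧ p.2 ∈ ks ∧ p.1 ≠ p.2) →
      l.foldl dstep (PySem.Dict.mk (ks.map fun v => (v, f v)))
        = PySem.Dict.mk (ks.map fun v => (v, (l.foldl (fun g p => updP p.1 p.2 g) f) v)) := by
  intro l
  induction l with
  | nil => intro f _; rfl
  | cons p rest ih =>
    intro f h
    obtain ⟨h1, h2, h3⟩ := h p (List.mem_cons_self)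
    simp only [List.foldl_cons]
    rw [show dstep (PySem.Dict.mk (ks.map fun v => (v, f v))) p
          = PySem.Dict.mk (ks.map fun v => (v, updP p.1 p.2 f v)) from
        dstep_mapped ks f p.1 p.2 h1 h2 h3]
    exact ih (updP p.1 p.2 f) (fun q hq => h q (List.mem_cons_of_mem _ hq))

lemma mem_events (n : Int) (p : Int × Int) (hp : p ∈ events n) :
    p.1 ∈ PySem.List.pyRange 1 (n+1) 1 ∧ p.2 ∈ PySem.List.pyRange 1 (n+1) 1 ∧ p.1 ≠ p.2 := by
  unfold events at hp
  rcases List.mem_flatMap.mp hp with ⟨i, hi, hmem⟩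
  rcases List.mem_map.mp hmem with ⟨j, hj, hpe⟩
  subst hpe
  rw [PySem.List.mem_pyRange_one] at hi hj ⊢
  refine ⟨hi, ?_, ?_⟩
  · rw [PySem.List.mem_pyRange_one]; constructor <;> omega
  · simp only [ne_eq]; omega

lemma foldl_insert_fresh :
    ∀ (ks : List Int) (acc : List (Int × PySem.Set Int)),
      (∀ k ∈ ks, k ∉ acc.map Prod.fst) → ks.Nodup →
      ks.foldl (fun d i => d.insert i PySem.Set.empty) (PySem.Dict.mk acc)
        = PySem.Dict.mk (acc ++ ks.map (fun v => (v, PySem.Set.empty))) := by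
  intro ks
  induction ks with
  | nil => intro acc _ _; simp
  | cons x xs ih =>
    intro acc hfresh hnd
    have hx : x ∉ acc.map Prod.fst := hfresh x List.mem_cons_self
    have hc : (PySem.Dict.mk acc).contains x = false := by
      simp only [PySem.Dict.contains, List.any_eq_false]
      intro p hp
      simp only [beq_iff_eq]
      intro hpe
      exact hx (List.mem_map.mpr ⟨p, hp, hpe⟩)
    simp only [List.foldl_cons]
    rw [show (PySem.Dict.mk acc).insert x PySem.Set.empty
          = PySem.Dict.mk (acc ++ [(x, PySem.Set.empty)]) by
        unfold PySem.Dict.insert; rw [hc]; simp]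
    rw [ih (acc ++ [(x, PySem.Set.empty)]) ?_ (List.Nodup.of_cons hnd)]
    · simp
    · intro k hk
      simp only [List.map_append, List.mem_append, List.map_cons, List.map_nil]
      rintro (h | h)
      · exact hfresh k (List.mem_cons_of_mem _ hk) h
      · simp only [List.mem_singleton] at h
        subst h
        exact (List.nodup_cons.mp hnd).1 hk

lemma mem_smallP {a v x : Int} (hx : x ∈ smallP a v) : 1 ≤ x ∧ x < a := by
  unfold smallP at hx
  have := (List.mem_filter.mp hx).1
  rw [PySem.List.mem_pyRange_one] at this
  exact this

lemma mem_midP {a c x : Int} (hx : x ∈ midP a c) : a + 1 ≤ x ∧ x < c := by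
  unfold midP at hx
  have := (List.mem_filter.mp hx).1
  rw [PySem.List.mem_pyRange_one] at this
  exact this

lemma smallP_succ (a v : Int) (ha : 1 ≤ a) :
    smallP (a+1) v
      = smallP a v ++ if (is_perfect_square (v + a) && a != v) = true then [a] else [] := by
  unfold smallP
  rw [PySem.List.pyRange_one_succ_right ha, List.filter_append, List.filter_singleton]
  simp [Bool.cond_eq_ite]

lemma midP_succ (a c : Int) (hc : a + 1 ≤ c) :
    midP a (c+1)
      = midP a c ++ if (is_perfect_square (a + c) && c != a) = true then [c] else [] := by
  unfold midP
  rw [PySem.List.pyRange_one_succ_right hc, List.filter_append, List.filter_singleton]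
  simp [Bool.cond_eq_ite]

lemma smallP_split (n a : Int) (h1 : 1 ≤ a) (h2 : a ≤ n) :
    smallP (n+1) a = smallP a a ++ midP a (n+1) := by
  unfold smallP midP
  rw [PySem.List.pyRange_one_append 1 a (n+1) h1 (by omega),
      PySem.List.pyRange_one_cons (show a < n+1 by omega), List.filter_append]
  simp [List.filter]

lemma add_small (s : PySem.Set Int) (c : Int) (hlt : ∀ x ∈ s, x < c) :
    PySem.Set.add s c = s ++ [c] :=
  PySem.Set.add_of_not_mem (fun h => absurd (hlt c h) (by omega))

-- one inner-loop iteration advances gI by one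
lemma step_g (n a c : Int) (ha1 : 1 ≤ a) (hc1 : a + 1 ≤ c)
    (f : Int → PySem.Set Int) (hf : ∀ v, 1 ≤ v → v ≤ n → f v = gI n a c v)
    (w : Int) (hw1 : 1 ≤ w) (hw2 : w ≤ n) :
    updP a c f w = gI n a (c+1) w := by
  have hca : c ≠ a := by omega
  unfold updP gI
  by_cases hsq : is_perfect_square (a + c) = true
  · rw [if_pos hsq]
    by_cases hwc : w = c
    · rw [if_pos hwc, hf c (by omega) (by omega)]
      unfold gI
      rw [if_neg (by omega : ¬ c < a), if_neg hca, if_neg (by omega : ¬ c < c),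
          if_neg (by omega : ¬ w < a), if_neg (by omega : w ≠ a),
          if_pos (by omega : w < c + 1), hwc]
      rw [add_small (smallP a c) a (fun x hx => (mem_smallP hx).2)]
      rw [smallP_succ a c ha1,
          if_pos (by simp only [Bool.and_eq_true, bne_iff_ne]; exact ⟨by rw [show c + a = a + c by ring]; exact hsq, by omega⟩)]
    · rw [if_neg hwc]
      by_cases hwa : w = a
      · rw [if_pos hwa, hf a (by omega) (by omega)]
        unfold gI
        rw [if_neg (by omega : ¬ a < a), if_pos rfl, if_neg (by omega : ¬ w < a),
            if_pos hwa]
        rw [add_small (smallP a a ++ midP a c) c (fun x hx => by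
              rcases List.mem_append.mp hx with h | h
              · have := (mem_smallP h).2; omega
              · exact (mem_midP h).2)]
        rw [List.append_assoc,
            midP_succ a c hc1,
            if_pos (by simp only [Bool.and_eq_true, bne_iff_ne]; exact ⟨hsq, hca⟩)]
      · rw [if_neg hwa, hf w hw1 hw2]
        unfold gI
        by_cases h1 : w < a
        · rw [if_pos h1, if_pos h1]
        · rw [if_neg h1, if_neg h1, if_neg hwa, if_neg hwa]
          by_cases h2 : w < c
          · rw [if_pos h2, if_pos (by omega : w < c + 1)]
          · rw [if_neg h2, if_neg (by omega : ¬ w < c + 1)]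
  · rw [if_neg hsq, hf w hw1 hw2]
    unfold gI
    by_cases h1 : w < a
    · rw [if_pos h1, if_pos h1]
    · rw [if_neg h1]
      by_cases hwa : w = a
      · rw [if_pos hwa, if_neg h1, if_pos hwa,
            midP_succ a c hc1,
            if_neg (by simp only [Bool.and_eq_true, bne_iff_ne, not_and]; intro h; exact absurd h hsq),
            List.append_nil]
      · rw [if_neg hwa, if_neg h1, if_neg hwa]
        by_cases h2 : w < c
        · rw [if_pos h2, if_pos (by omega : w < c + 1)]
        · by_cases h3 : w = c
          · rw [if_neg h2, if_pos (by omega : w < c + 1), h3,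
                smallP_succ a c ha1,
                if_neg (by simp only [Bool.and_eq_true, bne_iff_ne, not_and]; intro h; rw [show c + a = a + c by ring] at h; exact absurd h hsq),
                List.append_nil]
          · rw [if_neg h2, if_neg (by omega : ¬ w < c + 1)]

lemma inner_inv (n a : Int) (ha1 : 1 ≤ a) (ha2 : a ≤ n) :
    ∀ (t : Nat) (c : Int) (f : Int → PySem.Set Int), c = n + 1 - (t : Int) → a + 1 ≤ c →
      (∀ v, 1 ≤ v → v ≤ n → f v = gI n a c v) →
      ∀ v, 1 ≤ v → v ≤ n →
        ((PySem.List.pyRange c (n+1) 1).foldl (fun g j => updP a j g) f) v = fA n (a+1) v := by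
  intro t
  induction t with
  | zero =>
    intro c f hct hc hf v hv1 hv2
    have hce : c = n + 1 := by omega
    subst hce
    rw [PySem.List.pyRange_one_eq_nil (le_refl _), List.foldl_nil, hf v hv1 hv2]
    unfold gI fA
    by_cases h1 : v < a
    · simp [h1, show v < a + 1 by omega]
    · by_cases h2 : v = a
      · rw [if_neg h1, if_pos h2, if_pos (show v < a + 1 by omega), h2]
        exact (smallP_split n a ha1 ha2).symm
      · simp [h1, h2, show v < n + 1 by omega, show ¬ v < a + 1 by omega]
  | succ t ih =>
    intro c f hct hc hf v hv1 hv2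
    have hcl : c < n + 1 := by omega
    rw [PySem.List.pyRange_one_cons hcl, List.foldl_cons]
    exact ih (c+1) (updP a c f) (by omega) (by omega)
      (fun w hw1 hw2 => step_g n a c ha1 hc f hf w hw1 hw2) v hv1 hv2

lemma gI_start (n a : Int) (ha1 : 1 ≤ a) :
    ∀ v, gI n a (a+1) v = fA n a v := by
  intro v
  unfold gI fA
  by_cases h1 : v < a
  · simp [h1]
  · by_cases h2 : v = a
    · subst h2
      simp only [lt_irrefl, if_false]
      unfold midP
      rw [PySem.List.pyRange_one_eq_nil (le_refl _)]
      simp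
    · simp [h1, h2, show ¬ v < a + 1 by omega]

lemma outer_inv (n : Int) :
    ∀ (t : Nat) (a : Int) (f : Int → PySem.Set Int), a = n + 1 - (t : Int) → 1 ≤ a →
      (∀ v, 1 ≤ v → v ≤ n → f v = fA n a v) →
      ∀ v, 1 ≤ v → v ≤ n →
        ((PySem.List.pyRange a (n+1) 1).foldl
            (fun g i => (PySem.List.pyRange (i+1) (n+1) 1).foldl (fun g' j => updP i j g') g)
            f) v = smallP (n+1) v := by
  intro t
  induction t with
  | zero =>
    intro a f hat ha hf v hv1 hv2
    have hae : a = n + 1 := by omega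
    subst hae
    rw [PySem.List.pyRange_one_eq_nil (le_refl _), List.foldl_nil, hf v hv1 hv2]
    unfold fA
    simp [show v < n + 1 by omega]
  | succ t ih =>
    intro a f hat ha hf v hv1 hv2
    have hal : a < n + 1 := by omega
    rw [PySem.List.pyRange_one_cons hal, List.foldl_cons]
    refine ih (a+1) _ (by omega) (by omega) ?_ v hv1 hv2
    intro w hw1 hw2
    refine inner_inv n a ha (by omega) (n - a).toNat (a+1) f (by omega) (le_refl _)
      ?_ w hw1 hw2
    intro u hu1 hu2
    rw [hf u hu1 hu2, gI_start n a ha]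

-- A's result, in closed form
lemma build_graph_eq (n : Int) :
    build_graph n
      = (PySem.List.pyRange 1 (n+1) 1).map (fun v =>
          (v, ((events n).foldl (fun g p => updP p.1 p.2 g) (fun _ => PySem.Set.empty)) v)) := by
  simp only [build_graph]
  rw [foldl_insert_fresh (PySem.List.pyRange 1 (n+1) 1) [] (by simp)
      (PySem.List.nodup_pyRange_one 1 (n+1)), List.nil_append]
  have hflat : (PySem.List.pyRange 1 (n+1) 1).foldl (fun d i =>
        (PySem.List.pyRange (i+1) (n+1) 1).foldl (fun d j =>
          if is_perfect_square (i + j) then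
            (d.modify i PySem.Set.empty (fun s => PySem.Set.add s j)).modify j PySem.Set.empty
              (fun s => PySem.Set.add s i)
          else d) d)
        (PySem.Dict.mk ((PySem.List.pyRange 1 (n+1) 1).map (fun v => (v, PySem.Set.empty))))
      = (events n).foldl dstep
        (PySem.Dict.mk ((PySem.List.pyRange 1 (n+1) 1).map (fun v => (v, PySem.Set.empty)))) := by
    unfold events
    rw [List.foldl_flatMap]
    have hstep : (fun (acc : PySem.Dict Int (PySem.Set Int)) (i : Int) =>
        List.foldl dstep acc ((PySem.List.pyRange (i+1) (n+1) 1).map (fun j => (i, j))))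
        = fun acc i => (PySem.List.pyRange (i+1) (n+1) 1).foldl (fun d j =>
            if is_perfect_square (i + j) then
              (d.modify i PySem.Set.empty (fun s => PySem.Set.add s j)).modify j PySem.Set.empty
                (fun s => PySem.Set.add s i)
            else d) acc := by
      funext acc i
      rw [List.foldl_map]
      rfl
    rw [hstep]
  rw [hflat,
    foldl_dstep_mapped (PySem.List.pyRange 1 (n+1) 1) (events n) (fun _ => PySem.Set.empty)
      (fun p hp => mem_events n p hp)]

-- ---- B-side arithmetic ----

lemma pyIsqrt_nonneg (m : Int) : 0 ≤ pyIsqrt m := by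
  unfold pyIsqrt; exact Int.natCast_nonneg _

lemma isqrt_lt_iff (m k : Int) (hm : 0 ≤ m) (hk : 0 ≤ k) :
    pyIsqrt m < k ↔ m < k * k := by
  unfold pyIsqrt
  have hp : k * k = ((k.toNat * k.toNat : Nat) : Int) := by
    push_cast
    rw [Int.toNat_of_nonneg hk]
  rw [hp]
  have h1 : Nat.sqrt m.toNat < k.toNat ↔ m.toNat < k.toNat * k.toNat := by
    rw [Nat.sqrt_lt', pow_two]
  omega

lemma le_isqrt_iff (m k : Int) (hm : 0 ≤ m) (hk : 0 ≤ k) :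
    k ≤ pyIsqrt m ↔ k * k ≤ m := by
  unfold pyIsqrt
  have hp : k * k = ((k.toNat * k.toNat : Nat) : Int) := by
    push_cast
    rw [Int.toNat_of_nonneg hk]
  rw [hp]
  have h1 : k.toNat ≤ Nat.sqrt m.toNat ↔ k.toNat * k.toNat ≤ m.toNat := by
    rw [Nat.le_sqrt', pow_two]
  omega

lemma sq_iff (m : Int) (hm : 0 ≤ m) :
    is_perfect_square m = true ↔ ∃ k : Int, 0 ≤ k ∧ k * k = m := by
  unfold is_perfect_square
  rw [beq_iff_eq, pow_two]
  constructor
  · intro h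
    exact ⟨pyIsqrt m, pyIsqrt_nonneg m, h⟩
  · rintro ⟨k, hk, hkm⟩
    subst hkm
    unfold pyIsqrt
    have hs : (k.toNat * k.toNat).sqrt = k.toNat := by
      rw [← pow_two, Nat.sqrt_eq']
    rw [Int.toNat_mul hk hk, hs, Int.toNat_of_nonneg hk]

-- the list B builds for key i, before set() deduplication
def lbList (n i : Int) : List Int :=
  ((PySem.List.pyRange (pyIsqrt i + 1) (pyIsqrt (i + n) + 1) 1).filter
      (fun k => k * k != 2 * i)).map (fun k => k * k - i)

lemma mem_lbList (n i j : Int) (h1 : 1 ≤ i) (h2 : i ≤ n) :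
    j ∈ lbList n i ↔ j ∈ smallP (n+1) i := by
  unfold lbList smallP
  simp only [List.mem_map, List.mem_filter, PySem.List.mem_pyRange_one, bne_iff_ne, ne_eq,
    Bool.and_eq_true]
  constructor
  · rintro ⟨k, ⟨⟨hk1, hk2⟩, hk3⟩, hkj⟩
    have hk0 : 0 ≤ k := by have := pyIsqrt_nonneg i; omega
    have hik : i < k * k := by
      rw [← isqrt_lt_iff i k (by omega) hk0]; omega
    have hkn : k * k ≤ i + n := by
      rw [← le_isqrt_iff (i + n) k (by omega) hk0]; omega
    subst hkj
    refine ⟨⟨by omega, by omega⟩, ?_, by omega⟩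
    rw [show i + (k * k - i) = k * k by ring]
    exact (sq_iff (k * k) (by nlinarith)).mpr ⟨k, hk0, rfl⟩
  · rintro ⟨⟨hj1, hj2⟩, hsq, hji⟩
    rcases (sq_iff (i + j) (by omega)).mp hsq with ⟨k, hk0, hkm⟩
    refine ⟨k, ⟨⟨?_, ?_⟩, by omega⟩, by omega⟩
    · have : pyIsqrt i < k := by
        rw [isqrt_lt_iff i k (by omega) hk0]; omega
      omega
    · have : k ≤ pyIsqrt (i + n) := by
        rw [le_isqrt_iff (i + n) k (by omega) hk0]; omega
      omega

lemma pairwise_lbList (n i : Int) : (lbList n i).Pairwise (· < ·) := by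
  unfold lbList
  rw [List.pairwise_map]
  refine List.Pairwise.imp_of_mem (fun {a b} ha hb hab => ?_)
    ((PySem.List.pairwise_lt_pyRange_one _ _).filter _)
  have ha' := (PySem.List.mem_pyRange_one.mp (List.mem_of_mem_filter ha)).1
  have h0 : 0 ≤ a := by have := pyIsqrt_nonneg i; omega
  have := mul_self_lt_mul_self h0 hab
  omega

lemma pairwise_smallP (a v : Int) : (smallP a v).Pairwise (· < ·) :=
  (PySem.List.pairwise_lt_pyRange_one _ _).filter _

lemma lbList_eq_smallP (n i : Int) (h1 : 1 ≤ i) (h2 : i ≤ n) :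
    lbList n i = smallP (n+1) i := by
  have hn1 : (lbList n i).Nodup :=
    (pairwise_lbList n i).imp (fun h => ne_of_lt h)
  have hn2 : (smallP (n+1) i).Nodup :=
    (pairwise_smallP (n+1) i).imp (fun h => ne_of_lt h)
  refine List.Perm.eq_of_pairwise (le := (· < ·)) (fun a b _ _ hab hba => absurd hba (by omega))
    (pairwise_lbList n i) (pairwise_smallP (n+1) i) ?_
  exact (List.perm_ext_iff_of_nodup hn1 hn2).mpr (fun j => mem_lbList n i j h1 h2)

lemma alt_value (n i : Int) (h1 : 1 ≤ i) (h2 : i ≤ n) :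
    PySem.Set.ofList (lbList n i) = smallP (n+1) i := by
  rw [PySem.Set.ofList_eq_self_of_nodup _ ((pairwise_lbList n i).imp (fun h => ne_of_lt h))]
  exact lbList_eq_smallP n i h1 h2

-- ===== VERDICT (by name: the statement is the Claim_ definition above) =====
theorem build_graph_spec : Claim_equal_build_graph := by
  intro n _
  unfold Spec_build_graph
  rw [build_graph_eq n]
  unfold build_graph_alt
  refine List.map_congr_left (fun v hv => ?_)
  rw [PySem.List.mem_pyRange_one] at hv
  have hv1 : 1 ≤ v := hv.1
  have hv2 : v ≤ n := by omega
  have hA : ((events n).foldl (fun g p => updP p.1 p.2 g) (fun _ => PySem.Set.empty)) v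
      = smallP (n+1) v := by
    have hflat : (events n).foldl (fun g p => updP p.1 p.2 g) (fun _ => PySem.Set.empty)
        = (PySem.List.pyRange 1 (n+1) 1).foldl
            (fun g i => (PySem.List.pyRange (i+1) (n+1) 1).foldl (fun g' j => updP i j g') g)
            (fun _ => PySem.Set.empty) := by
      unfold events
      rw [List.foldl_flatMap]
      have hstep : (fun (acc : Int → PySem.Set Int) (i : Int) =>
          List.foldl (fun g p => updP p.1 p.2 g) acc
            ((PySem.List.pyRange (i+1) (n+1) 1).map (fun j => (i, j))))
          = fun acc i => (PySem.List.pyRange (i+1) (n+1) 1).foldl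
              (fun g' j => updP i j g') acc := by
        funext acc i
        rw [List.foldl_map]
      rw [hstep]
    rw [hflat]
    refine outer_inv n n.toNat 1 _ (by omega) (le_refl _) ?_ v hv1 hv2
    intro u hu1 hu2
    unfold fA smallP
    rw [PySem.List.pyRange_one_eq_nil (le_refl _)]
    simp [PySem.Set.empty, show ¬ u < 1 by omega]
  rw [hA, show PySem.Set.ofList
      (((PySem.List.pyRange (pyIsqrt v + 1) (pyIsqrt (v + n) + 1) 1).filter
          (fun k => k * k != 2 * v)).map (fun k => k * k - v)) = PySem.Set.ofList (lbList n v)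
    from rfl, alt_value n v hv1 hv2]
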